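-- pv_equiv track=rewrite | github.com/michiyasunaga/DrRepair | utils/code_process.py | deanonymize_code_str
-- ===== SOURCE A (Python) =====
-- def deanonymize_code_str(_code_str, anonymize_dict):
--     toks = _code_str.split()
--     string_count_in_code = len([tok for tok in toks if tok=="_<string>_"])
--     string_count_true = 0 if len(anonymize_dict)==0 else len(anonymize_dict["string"])
--     number_count_in_code = len([tok for tok in toks if tok=="_<number>_"])
--     number_count_true = 0 if len(anonymize_dict)==0 else len(anonymize_dict["number"])
--     char_count_in_code = len([tok for tok in toks if tok=="_<char>_"])
--     char_count_true = 0 if len(anonymize_dict)==0 else len(anonymize_dict["char"])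
--     if (string_count_in_code != string_count_true) or (number_count_in_code != number_count_true) or (char_count_in_code != char_count_true):
--         return None
--
--     string_count = 0
--     number_count = 0
--     char_count = 0
--     ret_toks = []
--     for tok in toks:
--         if tok == "_<string>_":
--             ret_toks.append(anonymize_dict["string"][string_count])
--             string_count += 1
--         elif tok == "_<number>_":
--             ret_toks.append(anonymize_dict["number"][number_count])
--             number_count += 1
--         elif tok == "_<char>_":
--             ret_toks.append(anonymize_dict["char"][char_count])
--             char_count += 1
--         else:
--             ret_toks.append(tok)
--     return " ".join(ret_toks)
-- ===== SOURCE B (Python) =====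
-- def deanonymize_code_str(_code_str, anonymize_dict):
--     if len(anonymize_dict) == 0:
--         its = {"string": iter([]), "number": iter([]), "char": iter([])}
--     else:
--         its = {"string": iter(anonymize_dict["string"]),
--                "number": iter(anonymize_dict["number"]),
--                "char": iter(anonymize_dict["char"])}
--     out = []
--     for tok in _code_str.split():
--         if tok in ("_<string>_", "_<number>_", "_<char>_"):
--             try:
--                 out.append(next(its[tok[2:-2]]))
--             except StopIteration:
--                 return None  # more placeholders than stored values
--         else:
--             out.append(tok)
--     sentinel = object()
--     if any(next(it, sentinel) is not sentinel for it in its.values()):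
--         return None  # leftover stored values
--     return " ".join(out)
-- ===== Notes on version B (the rewrite author's own statement) =====
-- stated objective: alternative
-- what changed: Replaces A's three up-front counting passes plus index-counter loop with one iterator per category and a single pass that consumes values on demand, detecting too-many placeholders via StopIteration and too-few via leftover iterator exhaustion.
import Mathlib
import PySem

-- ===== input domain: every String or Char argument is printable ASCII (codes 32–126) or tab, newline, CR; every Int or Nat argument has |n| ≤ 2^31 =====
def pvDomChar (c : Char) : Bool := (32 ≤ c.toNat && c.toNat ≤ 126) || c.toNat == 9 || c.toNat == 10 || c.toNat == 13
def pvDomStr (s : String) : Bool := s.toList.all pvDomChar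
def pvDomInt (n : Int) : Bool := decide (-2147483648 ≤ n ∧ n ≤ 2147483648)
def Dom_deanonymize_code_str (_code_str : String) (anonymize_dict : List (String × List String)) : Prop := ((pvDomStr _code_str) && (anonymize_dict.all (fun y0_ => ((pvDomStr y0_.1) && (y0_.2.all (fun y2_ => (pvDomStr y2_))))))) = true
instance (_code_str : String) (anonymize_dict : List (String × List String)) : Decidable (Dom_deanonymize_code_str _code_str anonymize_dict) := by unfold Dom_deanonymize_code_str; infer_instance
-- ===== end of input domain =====

-- B replaces A's three up-front counting passes plus index-counter loop with a single pass that
-- consumes one value stream per category, validating by exhaustion (alternative decomposition, same cost).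

-- ===== PORT A =====
def deanonymize_code_str (_code_str : String) (anonymize_dict : List (String × List String)) : Option String :=
  let toks := PySem.Str.split₀ _code_str
  -- anonymize_dict["string"] etc.: a missing key is a KeyError, excluded by Pre_, so the getD [] default is never read
  let S := ((PySem.Dict.mk anonymize_dict).get? "string").getD []
  let N := ((PySem.Dict.mk anonymize_dict).get? "number").getD []
  let C := ((PySem.Dict.mk anonymize_dict).get? "char").getD []
  let string_count_in_code := (toks.filter (· == "_<string>_")).length
  let string_count_true := if anonymize_dict.length == 0 then 0 else S.length
  let number_count_in_code := (toks.filter (· == "_<number>_")).length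
  let number_count_true := if anonymize_dict.length == 0 then 0 else N.length
  let char_count_in_code := (toks.filter (· == "_<char>_")).length
  let char_count_true := if anonymize_dict.length == 0 then 0 else C.length
  if string_count_in_code ≠ string_count_true ∨ number_count_in_code ≠ number_count_true ∨ char_count_in_code ≠ char_count_true then
    none
  else
    -- the for-loop over toks with counters string_count/number_count/char_count and ret_toks;
    -- under the count guard every index is in range, so the getD "" default is never read (no IndexError)
    let st := toks.foldl (fun (st : Nat × Nat × Nat × List String) tok =>
      let (sc, nc, cc, ret) := st
      if tok == "_<string>_" then (sc + 1, nc, cc, ret ++ [S.getD sc ""])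
      else if tok == "_<number>_" then (sc, nc + 1, cc, ret ++ [N.getD nc ""])
      else if tok == "_<char>_" then (sc, nc, cc + 1, ret ++ [C.getD cc ""])
      else (sc, nc, cc, ret ++ [tok])) (0, 0, 0, [])
    some (PySem.Str.join " " st.2.2.2)

-- ===== PORT B =====
-- B's single pass: the three iterators are the remaining-value streams; none = StopIteration
-- ("return None" in the except branch); on success it returns the built list and each iterator's leftover.
def deanonGo : List String → List String → List String → List String → List String →
    Option (List String × List String × List String × List String)
  | [], ss, ns, cs, acc => some (acc, ss, ns, cs)
  | t :: ts, ss, ns, cs, acc =>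
    if t == "_<string>_" then
      match ss with
      | [] => none
      | v :: r => deanonGo ts r ns cs (acc ++ [v])
    else if t == "_<number>_" then
      match ns with
      | [] => none
      | v :: r => deanonGo ts ss r cs (acc ++ [v])
    else if t == "_<char>_" then
      match cs with
      | [] => none
      | v :: r => deanonGo ts ss ns r (acc ++ [v])
    else deanonGo ts ss ns cs (acc ++ [t])

def deanonymize_code_str_alt (_code_str : String) (anonymize_dict : List (String × List String)) : Option String :=
  -- iter([]) for all three when the dict is empty, else iter(anonymize_dict[k]) (missing key = KeyError, outside Pre_)
  let S := if anonymize_dict.isEmpty then [] else ((PySem.Dict.mk anonymize_dict).get? "string").getD []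
  let N := if anonymize_dict.isEmpty then [] else ((PySem.Dict.mk anonymize_dict).get? "number").getD []
  let C := if anonymize_dict.isEmpty then [] else ((PySem.Dict.mk anonymize_dict).get? "char").getD []
  match deanonGo (PySem.Str.split₀ _code_str) S N C [] with
  | none => none
  | some (out, s', n', c') =>
    -- the exhaustion check: any iterator still holding values => None
    if s'.isEmpty && n'.isEmpty && c'.isEmpty then some (PySem.Str.join " " out) else none

-- ===== PRECONDITION & SPEC =====
-- Pre_ excludes exactly the inputs where Python A raises KeyError: a nonempty dict missing one of the
-- keys "string"/"number"/"char" (B raises the same KeyError there, so nothing is claimed about them).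
def Pre_deanonymize_code_str (_code_str : String) (anonymize_dict : List (String × List String)) : Prop :=
  anonymize_dict = [] ∨
    (((PySem.Dict.mk anonymize_dict).get? "string").isSome ∧
     ((PySem.Dict.mk anonymize_dict).get? "number").isSome ∧
     ((PySem.Dict.mk anonymize_dict).get? "char").isSome)
instance (_code_str : String) (anonymize_dict : List (String × List String)) : Decidable (Pre_deanonymize_code_str _code_str anonymize_dict) := by unfold Pre_deanonymize_code_str; infer_instance

def pvWitness_deanonymize_code_str : String × (List (String × List String)) :=
  ("a = _<string>_ ; b = _<number>_", [("string", ["\"hi\""]), ("number", ["42"]), ("char", [])])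

def Spec_deanonymize_code_str (_code_str : String) (anonymize_dict : List (String × List String)) (out : Option String) : Prop := out = deanonymize_code_str_alt _code_str anonymize_dict
instance (_code_str : String) (anonymize_dict : List (String × List String)) (out : Option String) : Decidable (Spec_deanonymize_code_str _code_str anonymize_dict out) := by unfold Spec_deanonymize_code_str; infer_instance

-- ===== CLAIM (what is proved, stated in full; the proofs are below) =====
def Claim_equal_deanonymize_code_str : Prop := ∀ (_code_str : String) (anonymize_dict : List (String × List String)), Dom_deanonymize_code_str _code_str anonymize_dict → Pre_deanonymize_code_str _code_str anonymize_dict → Spec_deanonymize_code_str _code_str anonymize_dict (deanonymize_code_str _code_str anonymize_dict)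

-- ===== LEMMAS AND PROOFS =====

-- reference substitution: each placeholder is replaced by the next value of its category's stream
def deanonSubst : List String → List String → List String → List String → List String
  | [], _, _, _ => []
  | t :: ts, ss, ns, cs =>
    if t == "_<string>_" then ss.headD "" :: deanonSubst ts ss.tail ns cs
    else if t == "_<number>_" then ns.headD "" :: deanonSubst ts ss ns.tail cs
    else if t == "_<char>_" then cs.headD "" :: deanonSubst ts ss ns cs.tail
    else t :: deanonSubst ts ss ns cs

-- B's pass succeeds iff no stream runs short; it appends the substitution and drops the consumed prefixes
theorem deanonGo_spec (toks : List String) : ∀ (ss ns cs acc : List String),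
    deanonGo toks ss ns cs acc =
      if (toks.filter (· == "_<string>_")).length ≤ ss.length ∧
         (toks.filter (· == "_<number>_")).length ≤ ns.length ∧
         (toks.filter (· == "_<char>_")).length ≤ cs.length then
        some (acc ++ deanonSubst toks ss ns cs,
              ss.drop (toks.filter (· == "_<string>_")).length,
              ns.drop (toks.filter (· == "_<number>_")).length,
              cs.drop (toks.filter (· == "_<char>_")).length)
      else none := by
  induction toks with
  | nil => intro ss ns cs acc; simp [deanonGo, deanonSubst]
  | cons t ts ih =>
    intro ss ns cs acc
    by_cases hs : t = "_<string>_"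
    · subst hs
      cases ss with
      | nil => simp [deanonGo, List.filter_cons]
      | cons v r =>
        rw [show deanonGo ("_<string>_" :: ts) (v :: r) ns cs acc = deanonGo ts r ns cs (acc ++ [v]) from by simp [deanonGo]]
        rw [ih]
        simp [List.filter_cons, deanonSubst]
    · by_cases hn : t = "_<number>_"
      · subst hn
        cases ns with
        | nil => simp [deanonGo, List.filter_cons]
        | cons v r =>
          rw [show deanonGo ("_<number>_" :: ts) ss (v :: r) cs acc = deanonGo ts ss r cs (acc ++ [v]) from by simp [deanonGo]]
          rw [ih]
          simp [List.filter_cons, deanonSubst]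
      · by_cases hc : t = "_<char>_"
        · subst hc
          cases cs with
          | nil => simp [deanonGo, List.filter_cons]
          | cons v r =>
            rw [show deanonGo ("_<char>_" :: ts) ss ns (v :: r) acc = deanonGo ts ss ns r (acc ++ [v]) from by simp [deanonGo]]
            rw [ih]
            simp [List.filter_cons, deanonSubst]
        · rw [show deanonGo (t :: ts) ss ns cs acc = deanonGo ts ss ns cs (acc ++ [t]) from by simp [deanonGo, hs, hn, hc]]
          rw [ih]
          simp [List.filter_cons, hs, hn, hc, deanonSubst]

-- A's counter-indexed loop computes the same substitution, read at the counters' offsets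
theorem deanonFold_spec (S N C : List String) (toks : List String) :
    ∀ (i j k : Nat) (acc : List String),
    toks.foldl (fun (st : Nat × Nat × Nat × List String) tok =>
      let (sc, nc, cc, ret) := st
      if tok == "_<string>_" then (sc + 1, nc, cc, ret ++ [S.getD sc ""])
      else if tok == "_<number>_" then (sc, nc + 1, cc, ret ++ [N.getD nc ""])
      else if tok == "_<char>_" then (sc, nc, cc + 1, ret ++ [C.getD cc ""])
      else (sc, nc, cc, ret ++ [tok])) (i, j, k, acc) =
    (i + (toks.filter (· == "_<string>_")).length,
     j + (toks.filter (· == "_<number>_")).length,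
     k + (toks.filter (· == "_<char>_")).length,
     acc ++ deanonSubst toks (S.drop i) (N.drop j) (C.drop k)) := by
  induction toks with
  | nil => intro i j k acc; simp [deanonSubst]
  | cons t ts ih =>
    intro i j k acc
    have hS : (S.drop i).headD "" = S.getD i "" := by
      simp [List.head?_drop, List.getD_eq_getElem?_getD]
    have hN : (N.drop j).headD "" = N.getD j "" := by
      simp [List.head?_drop, List.getD_eq_getElem?_getD]
    have hC : (C.drop k).headD "" = C.getD k "" := by
      simp [List.head?_drop, List.getD_eq_getElem?_getD]
    by_cases hs : t = "_<string>_"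
    · subst hs
      simp only [List.foldl_cons, List.filter_cons, ih]
      simp [deanonSubst, hS, List.tail_drop]
      omega
    · by_cases hn : t = "_<number>_"
      · subst hn
        simp only [List.foldl_cons, List.filter_cons, ih]
        simp [deanonSubst, hN, List.tail_drop]
        omega
      · by_cases hc : t = "_<char>_"
        · subst hc
          simp only [List.foldl_cons, List.filter_cons, ih]
          simp [deanonSubst, hC, List.tail_drop]
          omega
        · simp only [List.foldl_cons, List.filter_cons, ih]
          simp [deanonSubst, hs, hn, hc]

-- the two ports agree on every input (the KeyError region excluded by Pre_ is where the
-- ports' getD defaults would differ from Python, not from each other)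
theorem deanon_ports_eq (cs : String) (d : List (String × List String)) :
    deanonymize_code_str cs d = deanonymize_code_str_alt cs d := by
  unfold deanonymize_code_str deanonymize_code_str_alt
  simp only []
  have hSeq : (if d.isEmpty then ([] : List String) else ((PySem.Dict.mk d).get? "string").getD []) = ((PySem.Dict.mk d).get? "string").getD [] := by
    cases d <;> simp [PySem.Dict.get?]
  have hNeq : (if d.isEmpty then ([] : List String) else ((PySem.Dict.mk d).get? "number").getD []) = ((PySem.Dict.mk d).get? "number").getD [] := by
    cases d <;> simp [PySem.Dict.get?]
  have hCeq : (if d.isEmpty then ([] : List String) else ((PySem.Dict.mk d).get? "char").getD []) = ((PySem.Dict.mk d).get? "char").getD [] := by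
    cases d <;> simp [PySem.Dict.get?]
  rw [hSeq, hNeq, hCeq]
  set S := ((PySem.Dict.mk d).get? "string").getD [] with hSdef
  set N := ((PySem.Dict.mk d).get? "number").getD [] with hNdef
  set C := ((PySem.Dict.mk d).get? "char").getD [] with hCdef
  set toks := PySem.Str.split₀ cs with htoks
  have hStrue : (if d.length == 0 then 0 else S.length) = S.length := by
    cases d <;> simp [hSdef, PySem.Dict.get?]
  have hNtrue : (if d.length == 0 then 0 else N.length) = N.length := by
    cases d <;> simp [hNdef, PySem.Dict.get?]
  have hCtrue : (if d.length == 0 then 0 else C.length) = C.length := by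
    cases d <;> simp [hCdef, PySem.Dict.get?]
  rw [hStrue, hNtrue, hCtrue, deanonGo_spec]
  by_cases h1 : (toks.filter (· == "_<string>_")).length = S.length
  · by_cases h2 : (toks.filter (· == "_<number>_")).length = N.length
    · by_cases h3 : (toks.filter (· == "_<char>_")).length = C.length
      · rw [if_neg (by tauto), if_pos ⟨le_of_eq h1, le_of_eq h2, le_of_eq h3⟩, deanonFold_spec]
        simp [h1, h2, h3, List.drop_length]
      · rw [if_pos (by tauto)]
        by_cases hle : (toks.filter (· == "_<char>_")).length ≤ C.length
        · rw [if_pos ⟨le_of_eq h1, le_of_eq h2, hle⟩]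
          have : ¬ (C.drop (toks.filter (· == "_<char>_")).length).isEmpty := by
            simp [List.drop_eq_nil_iff]; omega
          simp [this]
        · rw [if_neg (by tauto)]
    · rw [if_pos (by tauto)]
      by_cases hle : (toks.filter (· == "_<number>_")).length ≤ N.length
      · by_cases h3le : (toks.filter (· == "_<char>_")).length ≤ C.length
        · rw [if_pos ⟨le_of_eq h1, hle, h3le⟩]
          have : ¬ (N.drop (toks.filter (· == "_<number>_")).length).isEmpty := by
            simp [List.drop_eq_nil_iff]; omega
          simp [this]
        · rw [if_neg (by tauto)]
      · rw [if_neg (by tauto)]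
  · rw [if_pos (by tauto)]
    by_cases hle : (toks.filter (· == "_<string>_")).length ≤ S.length
    · by_cases h2le : (toks.filter (· == "_<number>_")).length ≤ N.length
      · by_cases h3le : (toks.filter (· == "_<char>_")).length ≤ C.length
        · rw [if_pos ⟨hle, h2le, h3le⟩]
          have : ¬ (S.drop (toks.filter (· == "_<string>_")).length).isEmpty := by
            simp [List.drop_eq_nil_iff]; omega
          simp [this]
        · rw [if_neg (by tauto)]
      · rw [if_neg (by tauto)]
    · rw [if_neg (by tauto)]

-- ===== VERDICT (by name: the statement is the Claim_ definition above) =====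
theorem deanonymize_code_str_spec : Claim_equal_deanonymize_code_str := by
  intro cs d _ _
  unfold Spec_deanonymize_code_str
  exact deanon_ports_eq cs d
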